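-- pv_equiv track=rewrite | github.com/DNYoussef/AIVillage | scripts/bayesrag_wikipedia_ingestion.py | extract_global_tags
-- ===== SOURCE A (Python) =====
-- from typing import Any, Dict, List, Optional, Set, Tuple
--
-- def extract_global_tags(content: str, categories: List[str]) -> List[str]:
--     """Extract high-level semantic tags from article."""
--     tags = set()
--
--     # Add category-based tags
--     for category in categories:
--         if any(term in category.lower() for term in ["country", "nation"]):
--             tags.add("geography")
--         elif any(term in category.lower() for term in ["history", "historical"]):
--             tags.add("history")
--         elif any(
--             term in category.lower() for term in ["science", "physics", "biology"]
--         ):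
--             tags.add("science")
--         elif any(
--             term in category.lower() for term in ["art", "culture", "literature"]
--         ):
--             tags.add("culture")
--         elif any(term in category.lower() for term in ["politics", "government"]):
--             tags.add("politics")
--
--     # Content-based tag extraction (keyword matching)
--     content_lower = content.lower()
--
--     # Temporal indicators
--     if any(year in content for year in ["1800", "1900", "19th", "20th"]):
--         tags.add("historical-period")
--
--     # Geographic indicators
--     if any(
--         geo in content_lower for geo in ["country", "city", "region", "continent"]
--     ):
--         tags.add("geography")
--
--     # Scientific indicators
--     if any(
--         sci in content_lower
--         for sci in ["research", "study", "theory", "experiment"]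
--     ):
--         tags.add("science")
--
--     return list(tags)
-- ===== SOURCE B (Python) =====
-- CATEGORY_RULES = [
--     (("country", "nation"), "geography"),
--     (("history", "historical"), "history"),
--     (("science", "physics", "biology"), "science"),
--     (("art", "culture", "literature"), "culture"),
--     (("politics", "government"), "politics"),
-- ]
--
--
-- def _first_rule_tag(cl, rules):
--     """Recursively find the tag of the first rule whose any term occurs in cl."""
--     if not rules:
--         return None
--     terms, tag = rules[0]
--     if any(term in cl for term in terms):
--         return tag
--     return _first_rule_tag(cl, rules[1:])
--
--
-- def extract_global_tags(content, categories):
--     """Staged pipeline: build an optional-tag hit list, then dedupe into a set."""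
--     hits = [_first_rule_tag(c.lower(), CATEGORY_RULES) for c in categories]
--     content_lower = content.lower()
--     hits.append("historical-period" if any(y in content for y in ("1800", "1900", "19th", "20th")) else None)
--     hits.append("geography" if any(g in content_lower for g in ("country", "city", "region", "continent")) else None)
--     hits.append("science" if any(s in content_lower for s in ("research", "study", "theory", "experiment")) else None)
--     return list(set(h for h in hits if h is not None))
-- ===== Notes on version B (the rewrite author's own statement) =====
-- stated objective: alternative
-- what changed: Replaces A's single imperative pass that mutates a set through a five-branch elif chain with a staged pipeline: a recursive rule matcher maps each category to an optional tag, content checks append three more optional hits, and one final stage filters and deduplicates the hit list into the set.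
import Mathlib
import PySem

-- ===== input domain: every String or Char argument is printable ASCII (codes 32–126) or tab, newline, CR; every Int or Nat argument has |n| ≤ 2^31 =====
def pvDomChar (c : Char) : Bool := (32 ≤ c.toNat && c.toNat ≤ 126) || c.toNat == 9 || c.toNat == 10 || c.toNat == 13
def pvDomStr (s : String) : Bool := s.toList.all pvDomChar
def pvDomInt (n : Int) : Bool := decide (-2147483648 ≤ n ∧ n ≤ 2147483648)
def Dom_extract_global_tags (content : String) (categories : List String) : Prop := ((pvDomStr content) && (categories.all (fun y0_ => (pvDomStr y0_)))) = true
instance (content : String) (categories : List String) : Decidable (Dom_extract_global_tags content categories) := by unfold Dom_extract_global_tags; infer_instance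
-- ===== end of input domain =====

-- B restructures A's single imperative set-accumulating pass into a staged map/filter/dedup pipeline (objective: alternative decomposition).

-- ===== PORT A =====
-- literal transliteration of A: elif chain per category, then three content checks, into a set
def extract_global_tags (content : String) (categories : List String) : List String :=
  let tags : PySem.Set String := PySem.Set.empty
  let tags := categories.foldl (fun tags category =>
    if ["country", "nation"].any (fun term => PySem.Str.isIn term (PySem.Str.lower category)) then
      tags.add "geography"
    else if ["history", "historical"].any (fun term => PySem.Str.isIn term (PySem.Str.lower category)) then
      tags.add "history"
    else if ["science", "physics", "biology"].any (fun term => PySem.Str.isIn term (PySem.Str.lower category)) then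
      tags.add "science"
    else if ["art", "culture", "literature"].any (fun term => PySem.Str.isIn term (PySem.Str.lower category)) then
      tags.add "culture"
    else if ["politics", "government"].any (fun term => PySem.Str.isIn term (PySem.Str.lower category)) then
      tags.add "politics"
    else tags) tags
  let content_lower := PySem.Str.lower content
  let tags := if ["1800", "1900", "19th", "20th"].any (fun year => PySem.Str.isIn year content) then
      tags.add "historical-period" else tags
  let tags := if ["country", "city", "region", "continent"].any (fun geo => PySem.Str.isIn geo content_lower) then
      tags.add "geography" else tags
  let tags := if ["research", "study", "theory", "experiment"].any (fun sci => PySem.Str.isIn sci content_lower) then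
      tags.add "science" else tags
  tags

-- ===== PORT B =====
-- B-side helpers: the rule table and the recursive first-match helper of Source B
def pvCatRules : List (List String × String) :=
  [(["country", "nation"], "geography"),
   (["history", "historical"], "history"),
   (["science", "physics", "biology"], "science"),
   (["art", "culture", "literature"], "culture"),
   (["politics", "government"], "politics")]

def pvFirstRuleTag (cl : String) : List (List String × String) → Option String
  | [] => none
  | r :: rs =>
      if r.1.any (fun term => PySem.Str.isIn term cl) then some r.2
      else pvFirstRuleTag cl rs

-- staged pipeline: optional-tag hit list (map + appended content hits), then filter + dedupe into a set
def extract_global_tags_alt (content : String) (categories : List String) : List String :=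
  let hits := categories.map (fun c => pvFirstRuleTag (PySem.Str.lower c) pvCatRules)
  let content_lower := PySem.Str.lower content
  let hits := hits ++
    [if ["1800", "1900", "19th", "20th"].any (fun y => PySem.Str.isIn y content) then
        some "historical-period" else none,
     if ["country", "city", "region", "continent"].any (fun g => PySem.Str.isIn g content_lower) then
        some "geography" else none,
     if ["research", "study", "theory", "experiment"].any (fun s => PySem.Str.isIn s content_lower) then
        some "science" else none]
  PySem.Set.ofList (hits.filterMap id)

-- ===== PRECONDITION & SPEC =====
def Spec_extract_global_tags (content : String) (categories : List String) (out : List String) : Prop := out = extract_global_tags_alt content categories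
instance (content : String) (categories : List String) (out : List String) : Decidable (Spec_extract_global_tags content categories out) := by unfold Spec_extract_global_tags; infer_instance

-- ===== CLAIM =====
def Claim_equal_extract_global_tags : Prop := ∀ (content : String) (categories : List String), Dom_extract_global_tags content categories → Spec_extract_global_tags content categories (extract_global_tags content categories)

-- ===== LEMMAS AND PROOFS =====
-- A's elif-chain step adds exactly the tag pvFirstRuleTag finds
theorem pv_cat_step_eq (tags : PySem.Set String) (category : String) :
    (if ["country", "nation"].any (fun term => PySem.Str.isIn term (PySem.Str.lower category)) then
      tags.add "geography"
    else if ["history", "historical"].any (fun term => PySem.Str.isIn term (PySem.Str.lower category)) then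
      tags.add "history"
    else if ["science", "physics", "biology"].any (fun term => PySem.Str.isIn term (PySem.Str.lower category)) then
      tags.add "science"
    else if ["art", "culture", "literature"].any (fun term => PySem.Str.isIn term (PySem.Str.lower category)) then
      tags.add "culture"
    else if ["politics", "government"].any (fun term => PySem.Str.isIn term (PySem.Str.lower category)) then
      tags.add "politics"
    else tags) =
    (match pvFirstRuleTag (PySem.Str.lower category) pvCatRules with
     | some t => tags.add t
     | none => tags) := by
  simp only [pvCatRules, pvFirstRuleTag]
  split_ifs <;> rfl

-- A's category fold equals folding Set.add over B's filtered per-category hit list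
theorem pv_cat_fold_eq (cats : List String) (tags : PySem.Set String) :
    cats.foldl (fun tags category =>
      if ["country", "nation"].any (fun term => PySem.Str.isIn term (PySem.Str.lower category)) then
        tags.add "geography"
      else if ["history", "historical"].any (fun term => PySem.Str.isIn term (PySem.Str.lower category)) then
        tags.add "history"
      else if ["science", "physics", "biology"].any (fun term => PySem.Str.isIn term (PySem.Str.lower category)) then
        tags.add "science"
      else if ["art", "culture", "literature"].any (fun term => PySem.Str.isIn term (PySem.Str.lower category)) then
        tags.add "culture"
      else if ["politics", "government"].any (fun term => PySem.Str.isIn term (PySem.Str.lower category)) then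
        tags.add "politics"
      else tags) tags =
    ((cats.map (fun c => pvFirstRuleTag (PySem.Str.lower c) pvCatRules)).filterMap id).foldl
      PySem.Set.add tags := by
  induction cats generalizing tags with
  | nil => rfl
  | cons c cs ih =>
      simp only [List.map_cons, List.filterMap_cons]
      rw [List.foldl_cons]
      rw [pv_cat_step_eq]
      cases pvFirstRuleTag (PySem.Str.lower c) pvCatRules with
      | none => exact ih tags
      | some t => simp only [List.foldl_cons]; exact ih _

-- ===== VERDICT =====
theorem extract_global_tags_spec : Claim_equal_extract_global_tags := by
  intro content categories _
  unfold Spec_extract_global_tags extract_global_tags extract_global_tags_alt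
  dsimp only
  rw [PySem.Set.ofList_eq_foldl, List.filterMap_append, List.foldl_append]
  rw [pv_cat_fold_eq]
  split_ifs <;> rfl
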